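-- pv_equiv track=rewrite | github.com/k821209/vcf2hash | vcf2hash.py | modify_chrom
-- ===== SOURCE A (Python) =====
-- def modify_chrom(seq: str, edits):
--     if not edits:
--         return seq
--     arr = list(seq)
--     n = len(arr)
--     for pos0, base in edits:
--         if 0 <= pos0 < n:
--             arr[pos0] = base
--     return ''.join(arr)
-- ===== SOURCE B (Python) =====
-- def modify_chrom(seq: str, edits):
--     n = len(seq)
--     last = {}
--     for pos, base in edits:
--         if 0 <= pos < n:
--             last[pos] = base
--     parts = []
--     prev = 0
--     for pos in sorted(last):
--         parts.append(seq[prev:pos])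
--         parts.append(last[pos])
--         prev = pos + 1
--     parts.append(seq[prev:])
--     return ''.join(parts)
-- ===== Notes on version B (the rewrite author's own statement) =====
-- stated objective: alternative
-- what changed: B collects the surviving (last-wins, in-range) edits into a table, sorts the edited positions, and rebuilds the string piecewise from untouched slices of seq interleaved with the replacement bases, instead of looping over the edits mutating a char list in place.
import Mathlib
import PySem

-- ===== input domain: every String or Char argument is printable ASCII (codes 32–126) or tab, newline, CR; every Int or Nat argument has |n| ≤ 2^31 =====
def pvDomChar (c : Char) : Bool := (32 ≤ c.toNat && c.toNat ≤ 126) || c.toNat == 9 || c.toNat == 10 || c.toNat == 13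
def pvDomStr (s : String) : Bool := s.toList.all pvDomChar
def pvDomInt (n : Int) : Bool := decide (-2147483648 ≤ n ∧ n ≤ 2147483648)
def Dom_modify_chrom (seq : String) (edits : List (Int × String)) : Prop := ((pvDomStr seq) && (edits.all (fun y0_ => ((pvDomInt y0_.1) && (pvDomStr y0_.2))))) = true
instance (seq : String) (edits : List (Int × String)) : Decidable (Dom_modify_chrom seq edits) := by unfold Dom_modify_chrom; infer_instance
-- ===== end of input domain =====

-- B rebuilds the string piecewise: it keeps the surviving (last-wins, in-range) edits in a
-- table, sorts the edited positions, and concatenates untouched slices of seq with the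
-- replacement bases, instead of A's in-place mutation of a char list (objective: alternative).

-- ===== PORT A =====
-- loop over edits, mutating arr in place; the guard 0 ≤ pos0 < n makes the index
-- non-negative and in range, so List.set pos0.toNat is exact here
def modify_chrom (seq : String) (edits : List (Int × String)) : String :=
  if edits = [] then seq
  else
    let arr : List String := seq.toList.map (fun c => String.ofList [c])
    let n : Int := (arr.length : Int)
    let arr := edits.foldl
      (fun a pb => if 0 ≤ pb.1 ∧ pb.1 < n then a.set pb.1.toNat pb.2 else a) arr
    PySem.Str.join "" arr

-- ===== PORT B =====
-- last-wins table of in-range edits, then rebuild from sorted positions: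
-- parts = seq[prev:pos], last[pos], …, seq[prev:]. last[pos] is ported as getD pos ""
-- (exact: pos is drawn from last's keys, so the lookup always hits).
def modify_chrom_alt (seq : String) (edits : List (Int × String)) : String :=
  let cs := seq.toList
  let n : Int := (cs.length : Int)
  let last : PySem.Dict Int String := edits.foldl
    (fun d pb => if 0 ≤ pb.1 ∧ pb.1 < n then d.insert pb.1 pb.2 else d) PySem.Dict.empty
  let st := (PySem.List.sorted last.keys (fun x => x) false).foldl
    (fun (st : List String × Int) pos =>
      (st.1 ++ [String.ofList (PySem.List.slice cs (some st.2) (some pos)), last.getD pos ""],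
       pos + 1))
    ([], 0)
  PySem.Str.join "" (st.1 ++ [String.ofList (PySem.List.slice cs (some st.2) none)])

-- ===== PRECONDITION & SPEC =====
def Spec_modify_chrom (seq : String) (edits : List (Int × String)) (out : String) : Prop := out = modify_chrom_alt seq edits
instance (seq : String) (edits : List (Int × String)) (out : String) : Decidable (Spec_modify_chrom seq edits out) := by unfold Spec_modify_chrom; infer_instance

-- ===== CLAIM (what is proved, stated in full; the proofs are below) =====
def Claim_equal_modify_chrom : Prop := ∀ (seq : String) (edits : List (Int × String)), Dom_modify_chrom seq edits → Spec_modify_chrom seq edits (modify_chrom seq edits)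

-- ===== LEMMAS AND PROOFS =====

-- the last in-range edit at position k (scanning edits left to right), shared characterisation
def pvLast (es : List (Int × String)) (n k : Int) : Option String :=
  match es with
  | [] => none
  | e :: es => (pvLast es n k).or (if 0 ≤ e.1 ∧ e.1 < n ∧ e.1 = k then some e.2 else none)

theorem pvA_elem (es : List (Int × String)) (n : Int) :
    ∀ (arr : List String), n = (arr.length : Int) → ∀ (i : Nat),
      (es.foldl (fun a pb => if 0 ≤ pb.1 ∧ pb.1 < n then a.set pb.1.toNat pb.2 else a) arr)[i]? =
        (pvLast es n i).or arr[i]? := by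
  induction es with
  | nil => intro arr _ i; simp [pvLast]
  | cons e es ih =>
    intro arr hn i
    simp only [List.foldl_cons]
    rw [ih _ (by split <;> simp [hn])]
    simp only [pvLast, Option.or_assoc]
    congr 1
    split
    · rename_i h
      rw [List.getElem?_set]
      by_cases hk : e.1 = (i : Int)
      · have h1 : i < arr.length := by omega
        have h2 : (i : Int) < n := by omega
        have h3 : e.1.toNat = i := by omega
        simp [h1, h2, hk]
      · have : e.1.toNat ≠ i := by omega
        simp [this, hk]
    · rename_i h
      have : ¬ (0 ≤ e.1 ∧ e.1 < n ∧ e.1 = (i : Int)) := by tauto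
      simp [this]

theorem pvB_elem (es : List (Int × String)) (n : Int) :
    ∀ (d : PySem.Dict Int String) (k : Int),
      (es.foldl (fun d pb => if 0 ≤ pb.1 ∧ pb.1 < n then d.insert pb.1 pb.2 else d) d).get? k =
        (pvLast es n k).or (d.get? k) := by
  induction es with
  | nil => intro d k; simp [pvLast]
  | cons e es ih =>
    intro d k
    simp only [List.foldl_cons]
    rw [ih]
    simp only [pvLast, Option.or_assoc]
    congr 1
    split
    · rename_i h
      by_cases hk : k = e.1
      · simp [PySem.Dict.get?_insert_self, hk, h]
      · rw [PySem.Dict.get?_insert_of_ne _ _ hk]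
        have : ¬ (0 ≤ e.1 ∧ e.1 < n ∧ e.1 = k) := by tauto
        simp [this]
    · rename_i h
      have : ¬ (0 ≤ e.1 ∧ e.1 < n ∧ e.1 = k) := by tauto
      simp [this]

theorem pvLast_none_of_out (es : List (Int × String)) (n k : Int) (hk : k < 0 ∨ n ≤ k) :
    pvLast es n k = none := by
  induction es with
  | nil => rfl
  | cons e es ih =>
    simp only [pvLast, ih]
    have : ¬ (0 ≤ e.1 ∧ e.1 < n ∧ e.1 = k) := by rintro ⟨h1, h2, h3⟩; omega
    simp [this]

theorem pvJoin_singletons (cs : List Char) :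
    PySem.Str.join "" (cs.map (fun c => String.ofList [c])) = String.ofList cs := by
  apply String.toList_inj.mp
  simp [PySem.Str.toList_join, Function.comp_def]


-- the per-position view shared by both proofs: position i carries the dict value, else seq's char
def pvN (cs : List Char) (d : PySem.Dict Int String) : List String :=
  (PySem.List.enumerate cs).map (fun ic => (d.get? ic.1).getD (String.ofList [ic.2]))

theorem pvN_getElem? (cs : List Char) (d : PySem.Dict Int String) (j : Nat) :
    (pvN cs d)[j]? = cs[j]?.map (fun c => (d.get? (j : Int)).getD (String.ofList [c])) := by
  simp [pvN, PySem.List.getElem?_enumerate, Option.map_map, Function.comp_def]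

-- B's parts list, written as the structural recursion the foldl computes
def pvSegs (cs : List Char) (d : PySem.Dict Int String) : List Int → Int → List String
  | [], prev => [String.ofList (PySem.List.slice cs (some prev) none)]
  | p :: ps, prev =>
      String.ofList (PySem.List.slice cs (some prev) (some p)) :: d.getD p "" ::
        pvSegs cs d ps (p + 1)

theorem pvFold_segs (cs : List Char) (d : PySem.Dict Int String) :
    ∀ (ks : List Int) (acc : List String) (prev : Int),
      (ks.foldl (fun (st : List String × Int) pos =>
          (st.1 ++ [String.ofList (PySem.List.slice cs (some st.2) (some pos)), d.getD pos ""],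
           pos + 1)) (acc, prev)).1 ++
        [String.ofList (PySem.List.slice cs
          (some (ks.foldl (fun (st : List String × Int) pos =>
            (st.1 ++ [String.ofList (PySem.List.slice cs (some st.2) (some pos)), d.getD pos ""],
             pos + 1)) (acc, prev)).2) none)] =
      acc ++ pvSegs cs d ks prev := by
  intro ks
  induction ks with
  | nil => intro acc prev; simp [pvSegs]
  | cons p ps ih =>
    intro acc prev
    simp only [List.foldl_cons, pvSegs]
    rw [ih]
    simp

-- a run of non-edited positions is a slice of seq, seen elementwise
theorem pvN_run (cs : List Char) (d : PySem.Dict Int String) (a m : Nat)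
    (hnone : ∀ (j : Nat), a ≤ j → j < a + m → d.get? (j : Int) = none) :
    ((pvN cs d).drop a).take m = ((cs.drop a).take m).map (fun c => String.ofList [c]) := by
  apply List.ext_getElem?
  intro j
  simp only [List.getElem?_take, List.getElem?_drop, List.getElem?_map]
  split
  · rename_i hj
    rw [pvN_getElem?, hnone (a + j) (by omega) (by omega)]
    rcases cs[a + j]? with _ | c <;> simp
  · rfl

theorem pvFlatten_single (l : List Char) :
    ((l.map (fun c => String.ofList [c])).map String.toList).flatten = l := by
  induction l with
  | nil => rfl
  | cons c t ih => simpa [Function.comp_def] using ih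

-- the main characterisation: B's parts flatten to the per-position list from prev on
theorem pvSegs_join (cs : List Char) (d : PySem.Dict Int String) :
    ∀ (ks : List Int) (prev : Int), 0 ≤ prev →
      ks.Pairwise (· < ·) →
      (∀ k ∈ ks, prev ≤ k ∧ k < (cs.length : Int)) →
      (∀ k : Int, prev ≤ k → k < (cs.length : Int) → (k ∈ ks ↔ (d.get? k).isSome)) →
      ((pvSegs cs d ks prev).map String.toList).flatten =
        (((pvN cs d).drop prev.toNat).map String.toList).flatten := by
  intro ks
  induction ks with
  | nil =>
    intro prev h0 _ _ hmem
    have hdrop : (pvN cs d).drop prev.toNat =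
        (cs.drop prev.toNat).map (fun c => String.ofList [c]) := by
      have := pvN_run cs d prev.toNat (cs.length - prev.toNat) (by
        intro j hj1 hj2
        have h1 : prev ≤ (j : Int) := by omega
        have h2 : (j : Int) < (cs.length : Int) := by omega
        by_contra hcon
        have hs : (d.get? (j : Int)).isSome := Option.isSome_iff_ne_none.mpr hcon
        exact absurd ((hmem _ h1 h2).mpr hs) (by simp))
      rwa [List.take_of_length_le (by simp [pvN]; try omega),
           List.take_of_length_le (by simp; try omega)] at this
    rw [hdrop]
    have hsl : PySem.List.slice cs (some prev) none = cs.drop prev.toNat := by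
      rw [show prev = ((prev.toNat : Nat) : Int) by omega]
      exact PySem.List.slice_from_natCast cs prev.toNat
    rw [pvFlatten_single]
    simp [pvSegs, hsl]
  | cons p ps ih =>
    intro prev h0 hpw hb hmem
    have hp : prev ≤ p ∧ p < (cs.length : Int) := hb p (by simp)
    have hppos : 0 ≤ p := by omega
    -- split the right-hand side at position p
    have hlen : (pvN cs d).length = cs.length := by simp [pvN]
    have hsplit : (pvN cs d).drop prev.toNat =
        ((pvN cs d).drop prev.toNat).take (p.toNat - prev.toNat) ++
          (pvN cs d)[p.toNat] :: (pvN cs d).drop (p.toNat + 1) := by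
      rw [← List.drop_eq_getElem_cons (by omega)]
      rw [show (pvN cs d).drop p.toNat = ((pvN cs d).drop prev.toNat).drop (p.toNat - prev.toNat)
            by rw [List.drop_drop]; congr 1; omega]
      rw [List.take_append_drop]
    -- the run before p has no edits
    have hrun : ((pvN cs d).drop prev.toNat).take (p.toNat - prev.toNat) =
        ((cs.drop prev.toNat).take (p.toNat - prev.toNat)).map (fun c => String.ofList [c]) := by
      apply pvN_run
      intro j hj1 hj2
      have h1 : prev ≤ (j : Int) := by omega
      have h2 : (j : Int) < (cs.length : Int) := by omega
      by_contra hcon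
      have hs : (d.get? (j : Int)).isSome := Option.isSome_iff_ne_none.mpr hcon
      rcases List.mem_cons.mp ((hmem (j : Int) h1 h2).mpr hs) with h | h
      · omega
      · have := (List.pairwise_cons.mp hpw).1 _ h
        omega
    -- the element at p is the dict value
    obtain ⟨v, hv⟩ : ∃ v, d.get? p = some v := by
      have := (hmem p hp.1 hp.2).mp (by simp)
      exact Option.isSome_iff_exists.mp this
    have hatp : (pvN cs d)[p.toNat] = v := by
      have hlt : p.toNat < cs.length := by omega
      have : (pvN cs d)[p.toNat]? = some v := by
        rw [pvN_getElem?, List.getElem?_eq_getElem hlt]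
        simp [show ((p.toNat : Nat) : Int) = p by omega, hv]
      simpa [List.getElem?_eq_getElem (by omega : p.toNat < (pvN cs d).length)] using this
    -- the tail is the induction hypothesis at prev = p + 1
    have htail := ih (p + 1) (by omega)
      (List.pairwise_cons.mp hpw).2
      (by intro k hk
          have := hb k (by simp [hk])
          have := (List.pairwise_cons.mp hpw).1 k hk
          omega)
      (by intro k hk1 hk2
          have := hmem k (by omega) hk2
          rw [← this]
          constructor
          · intro h; simp [h]
          · intro h
            rcases List.mem_cons.mp h with h | h
            · omega
            · exact h)
    have hslice : PySem.List.slice cs (some prev) (some p) =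
        (cs.drop prev.toNat).take (p.toNat - prev.toNat) := by
      rw [show prev = ((prev.toNat : Nat) : Int) by omega,
          show p = ((p.toNat : Nat) : Int) by omega]
      exact PySem.List.slice_natCast cs prev.toNat p.toNat
    have hgd : d.getD p "" = v := by
      simp [PySem.Dict.getD_eq_get?_getD, hv]
    rw [hsplit]
    simp only [pvSegs, List.map_cons, List.map_append, List.flatten_cons, List.flatten_append,
      hrun, hatp, hslice, hgd, pvFlatten_single]
    rw [show p.toNat + 1 = (p + 1).toNat by omega]
    rw [htail]
    simp

-- A joins exactly the per-position list pvN
theorem pvA_eq_join (seq : String) (edits : List (Int × String)) :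
    modify_chrom seq edits = PySem.Str.join "" (pvN seq.toList (edits.foldl
      (fun d pb => if 0 ≤ pb.1 ∧ pb.1 < (seq.toList.length : Int) then d.insert pb.1 pb.2 else d)
      PySem.Dict.empty)) := by
  set cs := seq.toList with hcs
  set n : Int := (cs.length : Int) with hn
  set d := edits.foldl
    (fun d pb => if 0 ≤ pb.1 ∧ pb.1 < n then d.insert pb.1 pb.2 else d)
    (PySem.Dict.empty : PySem.Dict Int String) with hd
  have hget : ∀ k : Int, d.get? k = pvLast edits n k := by
    intro k
    rw [hd, pvB_elem]
    simp [PySem.Dict.get?_empty]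
  by_cases he : edits = []
  · subst he
    have hN : pvN cs d = cs.map (fun c => String.ofList [c]) := by
      apply List.ext_getElem?
      intro i
      rw [pvN_getElem?, hget]
      simp [pvLast]
    have hA : modify_chrom seq [] = seq := by simp [modify_chrom]
    rw [hA, hN, pvJoin_singletons, hcs]
    simp
  · simp only [modify_chrom, if_neg he, List.length_map, ← hcs, ← hn]
    congr 1
    apply List.ext_getElem?
    intro i
    rw [pvA_elem edits n _ (by simp [hn]), pvN_getElem?, hget]
    rcases hc : cs[i]? with _ | c
    · have hlen : cs.length ≤ i := List.getElem?_eq_none_iff.mp hc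
      rw [pvLast_none_of_out edits n i (Or.inr (by omega))]
      simp [hc]
    · simp only [List.getElem?_map, hc, Option.map_some]
      rcases pvLast edits n i with _ | b <;> simp

-- B joins exactly the parts list pvSegs
theorem pvB_eq_join (seq : String) (edits : List (Int × String)) :
    modify_chrom_alt seq edits = PySem.Str.join ""
      (pvSegs seq.toList (edits.foldl
        (fun d pb => if 0 ≤ pb.1 ∧ pb.1 < (seq.toList.length : Int) then d.insert pb.1 pb.2 else d)
        PySem.Dict.empty)
      (PySem.List.sorted (edits.foldl
        (fun d pb => if 0 ≤ pb.1 ∧ pb.1 < (seq.toList.length : Int) then d.insert pb.1 pb.2 else d)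
        PySem.Dict.empty).keys (fun x => x) false) 0) := by
  simp only [modify_chrom_alt]
  congr 1
  exact pvFold_segs seq.toList _ _ [] 0

theorem pvJoin_nil_flatten : ∀ (ls : List (List Char)), PySem.Chars.join [] ls = ls.flatten
  | [] => rfl
  | [x] => by simp [PySem.Chars.join_singleton]
  | x :: y :: t => by
      rw [PySem.Chars.join_cons_cons, pvJoin_nil_flatten (y :: t)]
      simp

-- the surviving keys, explicitly
theorem pvKeys (edits : List (Int × String)) (n : Int) :
    (edits.foldl (fun d pb => if 0 ≤ pb.1 ∧ pb.1 < n then d.insert pb.1 pb.2 else d)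
        (PySem.Dict.empty : PySem.Dict Int String)).keys =
      PySem.Set.ofList ((edits.filter (fun pb => decide (0 ≤ pb.1 ∧ pb.1 < n))).map (·.1)) := by
  rw [PySem.List.foldl_ite_eq_foldl_filter, PySem.Dict.keys_foldl_insert_key]
  simp [PySem.Dict.keys_empty, PySem.Set.update, PySem.Set.ofList_eq_foldl]

-- ===== VERDICT (by name: the statement is the Claim_ definition above) =====
theorem modify_chrom_spec : Claim_equal_modify_chrom := by
  intro seq edits _
  unfold Spec_modify_chrom
  rw [pvA_eq_join, pvB_eq_join]
  refine String.toList_inj.mp ?_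
  set cs := seq.toList with hcs
  set n : Int := (cs.length : Int) with hn
  set d := edits.foldl
    (fun d pb => if 0 ≤ pb.1 ∧ pb.1 < n then d.insert pb.1 pb.2 else d)
    (PySem.Dict.empty : PySem.Dict Int String) with hd
  set ks := PySem.List.sorted d.keys (fun x => x) false with hks
  have hkeys := pvKeys edits n
  rw [← hd] at hkeys
  have hnd : d.keys.Nodup := by rw [hkeys]; exact PySem.Set.nodup_ofList _
  have hbk : ∀ k ∈ d.keys, 0 ≤ k ∧ k < n := by
    intro k hk
    rw [hkeys] at hk
    have := (PySem.Set.mem_ofList _ _).mp hk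
    obtain ⟨pb, hpb, rfl⟩ := List.mem_map.mp this
    have := List.mem_filter.mp hpb
    exact of_decide_eq_true this.2
  have hperm : ks.Perm d.keys := PySem.List.sorted_perm d.keys (fun x => x) false
  have hksnd : ks.Nodup := hperm.symm.nodup hnd
  have hle : ks.Pairwise (· ≤ ·) := by
    have := PySem.List.sorted_pairwise d.keys (fun x => x)
    simpa using this
  have hpw : ks.Pairwise (· < ·) :=
    (hle.and hksnd).imp (fun h => lt_of_le_of_ne h.1 h.2)
  have hb : ∀ k ∈ ks, (0 : Int) ≤ k ∧ k < (cs.length : Int) := by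
    intro k hk
    exact hbk k (hperm.mem_iff.mp hk)
  have hmem : ∀ k : Int, (0 : Int) ≤ k → k < (cs.length : Int) →
      (k ∈ ks ↔ (d.get? k).isSome) := by
    intro k _ _
    rw [hperm.mem_iff, Option.isSome_iff_ne_none]
    have h := PySem.Dict.get?_eq_none_iff_not_mem_keys (d := d) (k := k)
    constructor
    · intro hm hnone
      exact h.mp hnone hm
    · intro hne
      by_contra hnm
      exact hne (h.mpr hnm)
  have h := pvSegs_join cs d ks 0 (by norm_num) hpw hb hmem
  rw [PySem.Str.toList_join, PySem.Str.toList_join,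
      show "".toList = ([] : List Char) from rfl, pvJoin_nil_flatten, pvJoin_nil_flatten]
  simpa using h.symm
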